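-- pv_equiv track=rewrite | github.com/alirezajavadi/tempname | replay_attack/msc.py | chebyshev_polynomial
-- ===== SOURCE A (Python) =====
-- def chebyshev_polynomial(n, x, p=14797):
--     if n == 0:
--         return 1
--     elif n == 1:
--         return x
--     else:
--         T_0 = 1
--         T_1 = x
--
--         for i in range(2, n + 1):
--             T_n = (2 * x * T_1 - T_0) % p
--             T_0 = T_1
--             T_1 = T_n
--
--         return T_1
-- ===== SOURCE B (Python) =====
-- def chebyshev_polynomial(n, x, p=14797):
--     if n == 0:
--         return 1
--     if n <= 1:
--         return x
--     a, b = _cheb_pair(n, x, p)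
--     return a
--
-- def _cheb_pair(k, x, p):
--     """(T_k(x) mod p, T_{k+1}(x) mod p) by Chebyshev fast doubling; k >= 0."""
--     if k == 0:
--         return (1 % p, x % p)
--     a, b = _cheb_pair(k // 2, x, p)
--     if k % 2:
--         return ((2 * a * b - x) % p, (2 * b * b - 1) % p)
--     return ((2 * a * a - 1) % p, (2 * a * b - x) % p)
-- ===== Notes on version B (the rewrite author's own statement) =====
-- stated objective: faster
-- what changed: Replaces A's linear iteration of the Chebyshev recurrence T_k = 2x*T_{k-1} - T_{k-2} mod p by recursive fast doubling on the pair (T_k mod p, T_{k+1} mod p) using the identities T_{2k} = 2*T_k^2 - 1 and T_{2k+1} = 2*T_k*T_{k+1} - x.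
import Mathlib
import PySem

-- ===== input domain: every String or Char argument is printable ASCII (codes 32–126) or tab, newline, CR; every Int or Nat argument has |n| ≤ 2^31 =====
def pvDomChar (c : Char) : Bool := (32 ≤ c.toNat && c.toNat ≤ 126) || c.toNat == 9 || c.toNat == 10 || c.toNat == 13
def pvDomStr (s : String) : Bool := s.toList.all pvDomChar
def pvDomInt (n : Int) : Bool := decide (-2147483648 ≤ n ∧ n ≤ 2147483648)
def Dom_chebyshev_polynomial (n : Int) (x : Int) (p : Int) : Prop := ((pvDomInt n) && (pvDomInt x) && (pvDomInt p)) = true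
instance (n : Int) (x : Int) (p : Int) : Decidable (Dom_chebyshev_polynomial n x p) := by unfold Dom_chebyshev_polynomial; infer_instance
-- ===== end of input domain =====

-- B replaces A's linear iteration of the Chebyshev recurrence by fast doubling on the
-- pair (T_k, T_{k+1}) mod p (O(log n) multiplications instead of O(n)); same return value.

-- ===== PORT A =====
def chebyshev_polynomial (n : Int) (x : Int) (p : Int) : Int :=
  if n = 0 then 1
  else if n = 1 then x
  else
    ((PySem.List.pyRange 2 (n + 1) 1).foldl
      (fun (st : Int × Int) _ => (st.2, PySem.Int.mod (2 * x * st.2 - st.1) p)) (1, x)).2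

-- ===== PORT B =====
-- port of Source B's _cheb_pair: recursion on k // 2 (k : Nat, B only calls it with k = n ≥ 2)
def chebPairPort (x : Int) (p : Int) (k : Nat) : Int × Int :=
  if h : k = 0 then (PySem.Int.mod 1 p, PySem.Int.mod x p)
  else
    let ab := chebPairPort x p (k / 2)
    if k % 2 = 1 then
      (PySem.Int.mod (2 * ab.1 * ab.2 - x) p, PySem.Int.mod (2 * ab.2 * ab.2 - 1) p)
    else
      (PySem.Int.mod (2 * ab.1 * ab.1 - 1) p, PySem.Int.mod (2 * ab.1 * ab.2 - x) p)
termination_by k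
decreasing_by exact Nat.div_lt_self (Nat.pos_of_ne_zero h) (by omega)

def chebyshev_polynomial_alt (n : Int) (x : Int) (p : Int) : Int :=
  if n = 0 then 1
  else if n ≤ 1 then x
  else (chebPairPort x p n.toNat).1

-- ===== PRECONDITION & SPEC =====
-- Python A raises ZeroDivisionError when the loop runs (n ≥ 2) and p = 0; nothing else is excluded.
def Pre_chebyshev_polynomial (n : Int) (x : Int) (p : Int) : Prop := 2 ≤ n → p ≠ 0
instance (n : Int) (x : Int) (p : Int) : Decidable (Pre_chebyshev_polynomial n x p) := by
  unfold Pre_chebyshev_polynomial; infer_instance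

def pvWitness_chebyshev_polynomial : Int × Int × Int := (5, 3, 7)

def Spec_chebyshev_polynomial (n : Int) (x : Int) (p : Int) (out : Int) : Prop := out = chebyshev_polynomial_alt n x p
instance (n : Int) (x : Int) (p : Int) (out : Int) : Decidable (Spec_chebyshev_polynomial n x p out) := by unfold Spec_chebyshev_polynomial; infer_instance

-- ===== CLAIM (what is proved, stated in full; the proofs are below) =====
def Claim_equal_chebyshev_polynomial : Prop := ∀ (n : Int) (x : Int) (p : Int), Dom_chebyshev_polynomial n x p → Pre_chebyshev_polynomial n x p → Spec_chebyshev_polynomial n x p (chebyshev_polynomial n x p)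

-- ===== LEMMAS AND PROOFS =====

-- The integer Chebyshev sequence T_k(x) of the first kind (proof-side reference object).
def chebT : Nat → Int → Int
  | 0, _ => 1
  | 1, x => x
  | (k+2), x => 2 * x * chebT (k+1) x - chebT k x

theorem chebT_eq (k : Nat) (x : Int) :
    chebT k x = (Polynomial.Chebyshev.T ℤ (k : ℤ)).eval x := by
  fun_induction chebT k x with
  | case1 _ => simp
  | case2 x => simp
  | case3 k x ih1 ih2 =>
    have h : ((k : ℤ) + 1 + 1) = ((k : ℤ) + 2) := by ring
    simp only [ih1, ih2]
    push_cast
    rw [h, Polynomial.Chebyshev.T_add_two]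
    simp

theorem chebT_double (j : Nat) (x : Int) :
    chebT (2 * j) x = 2 * chebT j x * chebT j x - 1 := by
  have h := congrArg (Polynomial.eval x) (Polynomial.Chebyshev.T_mul_T ℤ (j : ℤ) (j : ℤ))
  simp at h
  rw [chebT_eq, chebT_eq]
  push_cast
  rw [show ((j : ℤ) + (j : ℤ)) = 2 * (j : ℤ) by ring] at h
  linarith

theorem chebT_double_succ (j : Nat) (x : Int) :
    chebT (2 * j + 1) x = 2 * chebT j x * chebT (j + 1) x - x := by
  have h := congrArg (Polynomial.eval x) (Polynomial.Chebyshev.T_mul_T ℤ ((j : ℤ) + 1) (j : ℤ))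
  simp at h
  rw [chebT_eq, chebT_eq, chebT_eq]
  push_cast
  rw [show ((j : ℤ) + 1 + (j : ℤ)) = 2 * (j : ℤ) + 1 by ring] at h
  linarith

-- Python '%' respects congruence mod the divisor (also trivially at divisor 0).
theorem pmod_congr {a1 a2 b : Int} (h : b ∣ (a1 - a2)) :
    PySem.Int.mod a1 b = PySem.Int.mod a2 b := by
  obtain ⟨k, hk⟩ := h
  have : a1 = a2 + b * k := by linarith
  subst this
  simp [PySem.Int.mod, Int.add_mul_fmod_self_left]

theorem dvd_pmod_sub (a b : Int) : b ∣ (PySem.Int.mod a b - a) :=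
  ⟨-(PySem.Int.floordiv a b), by linear_combination PySem.Int.floordiv_mul_add_mod a b⟩

theorem chebPairPort_spec (x p : Int) (k : Nat) :
    chebPairPort x p k =
      (PySem.Int.mod (chebT k x) p, PySem.Int.mod (chebT (k + 1) x) p) := by
  induction k using Nat.strong_induction_on with
  | _ k ih =>
    rw [chebPairPort]
    by_cases h : k = 0
    · subst h; simp [chebT]
    · have ihj := ih (k / 2) (Nat.div_lt_self (Nat.pos_of_ne_zero h) (by omega))
      simp only [h, dif_neg, not_false_iff, ihj]
      set j := k / 2 with hj
      set a := PySem.Int.mod (chebT j x) p with ha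
      set b := PySem.Int.mod (chebT (j + 1) x) p with hb
      have d1 : p ∣ (a - chebT j x) := dvd_pmod_sub _ _
      have d2 : p ∣ (b - chebT (j + 1) x) := dvd_pmod_sub _ _
      by_cases h2 : k % 2 = 1
      · have hk : k = 2 * j + 1 := by omega
        simp only [h2, if_pos]
        rw [hk]
        refine Prod.ext ?_ ?_
        · show PySem.Int.mod (2 * a * b - x) p = PySem.Int.mod (chebT (2 * j + 1) x) p
          rw [chebT_double_succ]
          refine pmod_congr ?_
          have e : (2 * a * b - x) - (2 * chebT j x * chebT (j + 1) x - x)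
              = 2 * b * (a - chebT j x) + 2 * chebT j x * (b - chebT (j + 1) x) := by ring
          rw [e]
          exact dvd_add (Dvd.dvd.mul_left d1 _) (Dvd.dvd.mul_left d2 _)
        · show PySem.Int.mod (2 * b * b - 1) p = PySem.Int.mod (chebT (2 * j + 1 + 1) x) p
          rw [show 2 * j + 1 + 1 = 2 * (j + 1) by ring, chebT_double]
          refine pmod_congr ?_
          have e : (2 * b * b - 1) - (2 * chebT (j + 1) x * chebT (j + 1) x - 1)
              = (2 * b + 2 * chebT (j + 1) x) * (b - chebT (j + 1) x) := by ring
          rw [e]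
          exact Dvd.dvd.mul_left d2 _
      · have hk : k = 2 * j := by omega
        simp only [h2, if_neg, not_false_iff]
        rw [hk]
        refine Prod.ext ?_ ?_
        · show PySem.Int.mod (2 * a * a - 1) p = PySem.Int.mod (chebT (2 * j) x) p
          rw [chebT_double]
          refine pmod_congr ?_
          have e : (2 * a * a - 1) - (2 * chebT j x * chebT j x - 1)
              = (2 * a + 2 * chebT j x) * (a - chebT j x) := by ring
          rw [e]
          exact Dvd.dvd.mul_left d1 _
        · show PySem.Int.mod (2 * a * b - x) p = PySem.Int.mod (chebT (2 * j + 1) x) p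
          rw [chebT_double_succ]
          refine pmod_congr ?_
          have e : (2 * a * b - x) - (2 * chebT j x * chebT (j + 1) x - x)
              = 2 * b * (a - chebT j x) + 2 * chebT j x * (b - chebT (j + 1) x) := by ring
          rw [e]
          exact dvd_add (Dvd.dvd.mul_left d1 _) (Dvd.dvd.mul_left d2 _)

-- Invariant of A's loop: after processing 2, …, t+2 the pair is congruent to (T_{t+1}, T_{t+2}) mod p,
-- and the second component is exactly T_{t+2} mod p.
theorem loopA_spec (x p : Int) (t : Nat) :
    p ∣ (((PySem.List.pyRange 2 ((t : Int) + 3) 1).foldl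
          (fun (st : Int × Int) _ => (st.2, PySem.Int.mod (2 * x * st.2 - st.1) p)) (1, x)).1
        - chebT (t + 1) x) ∧
    ((PySem.List.pyRange 2 ((t : Int) + 3) 1).foldl
          (fun (st : Int × Int) _ => (st.2, PySem.Int.mod (2 * x * st.2 - st.1) p)) (1, x)).2
        = PySem.Int.mod (chebT (t + 2) x) p := by
  induction t with
  | zero =>
    rw [show ((0 : Nat) : Int) + 3 = 2 + 1 by norm_num,
        PySem.List.pyRange_one_succ_right (by norm_num), PySem.List.pyRange_one_eq_nil (by norm_num)]
    constructor
    · simp [chebT]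
    · simp only [List.nil_append, List.foldl_cons, List.foldl_nil]
      norm_num [chebT]
  | succ t ih =>
    have hsplit : PySem.List.pyRange 2 (((t + 1 : Nat) : Int) + 3) 1
        = PySem.List.pyRange 2 ((t : Int) + 3) 1 ++ [(t : Int) + 3] := by
      rw [show (((t + 1 : Nat) : Int) + 3) = ((t : Int) + 3) + 1 by push_cast; ring]
      exact PySem.List.pyRange_one_succ_right (by omega)
    rw [hsplit, List.foldl_append]
    set s := (PySem.List.pyRange 2 ((t : Int) + 3) 1).foldl
        (fun (st : Int × Int) _ => (st.2, PySem.Int.mod (2 * x * st.2 - st.1) p)) (1, x) with hs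
    obtain ⟨ih1, ih2⟩ := ih
    constructor
    · show p ∣ (s.2 - chebT (t + 1 + 1) x)
      rw [ih2]
      exact dvd_pmod_sub _ _
    · show PySem.Int.mod (2 * x * s.2 - s.1) p = PySem.Int.mod (chebT (t + 1 + 2) x) p
      have hT : chebT (t + 1 + 2) x = 2 * x * chebT (t + 2) x - chebT (t + 1) x := by
        simp [chebT]
      rw [hT]
      refine pmod_congr ?_
      have d2 : p ∣ (s.2 - chebT (t + 2) x) := by rw [ih2]; exact dvd_pmod_sub _ _
      have e : (2 * x * s.2 - s.1) - (2 * x * chebT (t + 2) x - chebT (t + 1) x)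
          = 2 * x * (s.2 - chebT (t + 2) x) - (s.1 - chebT (t + 1) x) := by ring
      rw [e]
      exact dvd_sub (Dvd.dvd.mul_left d2 _) ih1

-- ===== VERDICT (by name: the statement is the Claim_ definition above) =====
theorem chebyshev_polynomial_spec : Claim_equal_chebyshev_polynomial := by
  intro n x p _ _
  unfold Spec_chebyshev_polynomial chebyshev_polynomial chebyshev_polynomial_alt
  by_cases h0 : n = 0
  · simp [h0]
  · by_cases h1 : n = 1
    · simp [h1]
    · by_cases hle : n ≤ 1
      · -- n < 0: A's loop body never runs; B returns x as well
        rw [if_neg h0, if_neg h1, if_neg h0, if_pos hle,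
            PySem.List.pyRange_one_eq_nil (by omega)]
        simp
      · -- n ≥ 2
        have h2 : 2 ≤ n := by omega
        rw [if_neg h0, if_neg h1, if_neg h0, if_neg hle]
        set t := (n - 2).toNat with ht
        have htn : (t : Int) = n - 2 := by omega
        have hr : n + 1 = (t : Int) + 3 := by omega
        have hton : n.toNat = t + 2 := by omega
        rw [hr, (loopA_spec x p t).2, hton, chebPairPort_spec]
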